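-- pv_equiv track=rewrite | github.com/linicam/lintcode | 89_k-sum/k-sum.py | kSum
-- ===== SOURCE A (Python) =====
-- def kSum(A, k, target):
--     # write your code here
--     s = [[0] * (target + 1) for j in range(k + 1)]
--     s[0][0] = 1
--     for i in range(len(A)):
--         for j in range(k, 0, -1):
--             for x in range(target, A[i] - 1, -1):
--                 s[j][x] = s[j - 1][x - A[i]] + s[j][x]
--     return s[k][target]
-- ===== SOURCE B (Python) =====
-- def kSum(A, k, target):
--     # top-down memoized include/exclude recursion:
--     # f(i, j, t) = number of ways to pick j items from A[0:i] summing to t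
--     memo = {}
--
--     def f(i, j, t):
--         key = (i, j, t)
--         if key in memo:
--             return memo[key]
--         if i == 0:
--             r = 1 if j == 0 and t == 0 else 0
--         else:
--             r = f(i - 1, j, t)
--             if j >= 1 and t - A[i - 1] >= 0:
--                 r += f(i - 1, j - 1, t - A[i - 1])
--         memo[key] = r
--         return r
--
--     return f(len(A), k, target)
-- ===== Notes on version B (the rewrite author's own statement) =====
-- stated objective: alternative
-- what changed: Replaces the bottom-up in-place (k+1)x(target+1) array DP with reversed index loops by a top-down memoized include/exclude recursion f(i,j,t) on the prefix length, keyed by (index,count,sum).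
import Mathlib
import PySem

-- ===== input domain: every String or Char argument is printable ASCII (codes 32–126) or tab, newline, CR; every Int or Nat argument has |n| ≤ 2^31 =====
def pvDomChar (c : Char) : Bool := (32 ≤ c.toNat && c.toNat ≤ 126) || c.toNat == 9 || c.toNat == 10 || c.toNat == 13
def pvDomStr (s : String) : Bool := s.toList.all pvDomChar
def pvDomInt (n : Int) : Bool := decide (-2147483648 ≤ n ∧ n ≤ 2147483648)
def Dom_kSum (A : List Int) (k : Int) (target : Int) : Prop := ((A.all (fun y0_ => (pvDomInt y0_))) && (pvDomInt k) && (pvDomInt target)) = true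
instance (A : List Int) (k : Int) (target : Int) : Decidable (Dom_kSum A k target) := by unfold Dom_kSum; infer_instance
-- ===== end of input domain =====

-- B replaces A's backward in-place dense (k+1)×(target+1) array DP by a top-down
-- include/exclude recursion on the prefix length, memoized in Python by a dict
-- (objective: alternative, similar cost).

-- ===== PORT A =====
-- Literal transliteration of A.  The table is an Array of Array rows (Python lists with O(1)
-- indexing; s[j][x] = v updates row j in place via Array.modify, as Python does).  All indices
-- reached under Pre_kSum are nonnegative and in range, so getD/setIfInBounds/toNat are exact there.
def kSum (A : List Int) (k : Int) (target : Int) : Int :=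
  let s0 : Array (Array Int) :=
    ((PySem.List.pyRange 0 (k+1) 1).map (fun _ => Array.replicate (target+1).toNat (0:Int))).toArray
  let s1 := s0.modify (0:Int).toNat (fun row => row.setIfInBounds (0:Int).toNat 1)
  let s2 := (PySem.List.pyRange 0 (A.length : Int) 1).foldl (fun s i =>
      let a := PySem.List.pyGetD A i 0
      (PySem.List.pyRange k 0 (-1)).foldl (fun s j =>
        (PySem.List.pyRange target (a-1) (-1)).foldl (fun s x =>
          let v := (s.getD (j-1).toNat #[]).getD (x - a).toNat 0 +
                   (s.getD j.toNat #[]).getD x.toNat 0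
          s.modify j.toNat (fun row => row.setIfInBounds x.toNat v)) s) s) s1
  (s2.getD k.toNat #[]).getD target.toNat 0

-- ===== PORT B =====
-- Literal transliteration of Source B.  The dict memo only caches values of the pure inner
-- recursion f, so the port is that recursion itself, on the prefix length i (a Nat equal
-- to Python's i ≥ 0); A[i-1] is read as Source B reads it (index i-1 ≥ 0 in range).
def kSumRec (A : List Int) (i : Nat) (j t : Int) : Int :=
  match i with
  | 0 => if j = 0 ∧ t = 0 then 1 else 0
  | Nat.succ i' =>
      let a := PySem.List.pyGetD A (i' : Int) 0
      let r := kSumRec A i' j t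
      if 1 ≤ j ∧ 0 ≤ t - a then r + kSumRec A i' (j-1) (t-a) else r

def kSum_alt (A : List Int) (k : Int) (target : Int) : Int :=
  kSumRec A A.length k target

-- ===== PRECONDITION & SPEC =====
-- Pre_kSum is exactly where A returns: A raises IndexError when k<0 or target<0 (empty table
-- rows) and when k≥1 with a negative element (the read index x-A[i] exceeds the row).
def Pre_kSum (A : List Int) (k : Int) (target : Int) : Prop :=
  0 ≤ k ∧ 0 ≤ target ∧ (k = 0 ∨ ∀ a ∈ A, 0 ≤ a)
instance (A : List Int) (k : Int) (target : Int) : Decidable (Pre_kSum A k target) := by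
  unfold Pre_kSum; infer_instance

def pvWitness_kSum : List Int × Int × Int := ([1, 2, 3], 2, 3)

def Spec_kSum (A : List Int) (k : Int) (target : Int) (out : Int) : Prop := out = kSum_alt A k target
instance (A : List Int) (k : Int) (target : Int) (out : Int) : Decidable (Spec_kSum A k target out) := by unfold Spec_kSum; infer_instance

-- ===== CLAIM (what is proved, stated in full; the proofs are below) =====
def Claim_equal_kSum : Prop := ∀ (A : List Int) (k : Int) (target : Int), Dom_kSum A k target → Pre_kSum A k target → Spec_kSum A k target (kSum A k target)

-- ===== LEMMAS AND PROOFS =====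

-- abstract DP
def F0 : Int → Int → Int := fun j t => if j = 0 ∧ t = 0 then 1 else 0
def stepF (k target a : Int) (F : Int → Int → Int) : Int → Int → Int :=
  fun j t => F j t + (if j ≤ k ∧ t ≤ target then F (j-1) (t-a) else 0)
def Zok (F : Int → Int → Int) : Prop := ∀ j t, (j < 0 ∨ t < 0) → F j t = 0

-- A-side
def getAt (s : List (List Int)) (j x : Int) : Int :=
  PySem.List.pyGetD (PySem.List.pyGetD s j []) x 0
def updAt (s : List (List Int)) (j x v : Int) : List (List Int) :=
  PySem.List.pySetD s j (PySem.List.pySetD (PySem.List.pyGetD s j []) x v)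
def Shape (k target : Int) (s : List (List Int)) : Prop :=
  s.length = (k+1).toNat ∧ ∀ r ∈ s, r.length = (target+1).toNat
def xbody (a j : Int) (s : List (List Int)) (x : Int) : List (List Int) :=
  updAt s j x (getAt s (j-1) (x-a) + getAt s j x)
def rowloop (target a j : Int) (s : List (List Int)) : List (List Int) :=
  (PySem.List.pyRange target (a-1) (-1)).foldl (xbody a j) s
def ibody (k target a : Int) (s : List (List Int)) : List (List Int) :=
  (PySem.List.pyRange k 0 (-1)).foldl (fun s j => rowloop target a j s) s

theorem getD_set_lists (s : List (List Int)) (m i : Nat) (r : List Int) :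
    (s.set m r).getD i [] = if m = i ∧ m < s.length then r else s.getD i [] := by
  simp only [List.getD_eq_getElem?_getD, List.getElem?_set]
  split_ifs with h1 h2 h3 <;> simp_all
  omega

theorem getD_set_ints (s : List Int) (m i : Nat) (r : Int) :
    (s.set m r).getD i 0 = if m = i ∧ m < s.length then r else s.getD i 0 := by
  simp only [List.getD_eq_getElem?_getD, List.getElem?_set]
  split_ifs with h1 h2 h3 <;> simp_all
  omega

theorem getAt_nonneg (s : List (List Int)) (j x : Int) (hj : 0 ≤ j) (hx : 0 ≤ x) :
    getAt s j x = (s.getD j.toNat []).getD x.toNat 0 := by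
  lift j to ℕ using hj
  lift x to ℕ using hx
  unfold getAt
  simp [PySem.List.pyGetD_natCast]

theorem updAt_nonneg (s : List (List Int)) (j x v : Int) (hj : 0 ≤ j) (hx : 0 ≤ x) :
    updAt s j x v = s.set j.toNat ((s.getD j.toNat []).set x.toNat v) := by
  lift j to ℕ using hj
  lift x to ℕ using hx
  unfold updAt
  simp [PySem.List.pyGetD_natCast, PySem.List.pySetD_natCast]

theorem shape_updAt {k target : Int} {s : List (List Int)} (hs : Shape k target s)
    (j x v : Int) (hj : 0 ≤ j) (hx : 0 ≤ x) : Shape k target (updAt s j x v) := by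
  rw [updAt_nonneg s j x v hj hx]
  by_cases hlt : j.toNat < s.length
  · obtain ⟨hl, hr⟩ := hs
    refine ⟨by simpa using hl, ?_⟩
    intro r hrm
    rcases List.mem_or_eq_of_mem_set hrm with h | h
    · exact hr r h
    · subst h
      rw [List.getD_eq_getElem _ _ hlt]
      have := hr _ (List.getElem_mem hlt)
      simpa using this
  · rw [List.set_eq_of_length_le (by omega)]
    exact hs

theorem getAt_updAt {s : List (List Int)} (j x v : Int) (hj : 0 ≤ j) (hx : 0 ≤ x)
    (j' x' : Int) (hj' : 0 ≤ j') (hx' : 0 ≤ x')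
    (hin : j.toNat < s.length) (hxin : x.toNat < (s.getD j.toNat []).length) :
    getAt (updAt s j x v) j' x' = if j' = j ∧ x' = x then v else getAt s j' x' := by
  rw [updAt_nonneg s j x v hj hx, getAt_nonneg _ _ _ hj' hx', getAt_nonneg _ _ _ hj' hx']
  rw [getD_set_lists]
  by_cases hjj : j.toNat = j'.toNat
  · rw [if_pos ⟨hjj, hin⟩, show j'.toNat = j.toNat from hjj.symm, getD_set_ints]
    by_cases hxx : x.toNat = x'.toNat
    · rw [show x'.toNat = x.toNat from hxx.symm, if_pos ⟨rfl, hxin⟩, if_pos ⟨by omega, by omega⟩]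
    · rw [if_neg (fun h => hxx h.1), if_neg (fun h => hxx (by omega))]
  · rw [if_neg (fun h => hjj h.1), if_neg (fun h => hjj (by omega))]

theorem row_len {k target : Int} {s : List (List Int)} (hs : Shape k target s)
    {j : Int} (hj : 0 ≤ j) (hjk : j ≤ k) :
    j.toNat < s.length ∧ (s.getD j.toNat []).length = (target+1).toNat := by
  obtain ⟨hl, hr⟩ := hs
  have hlt : j.toNat < s.length := by omega
  refine ⟨hlt, ?_⟩
  rw [List.getD_eq_getElem _ _ hlt]
  exact hr _ (List.getElem_mem hlt)

-- x-loop
theorem xloop_aux {k target a j : Int} (ha : 0 ≤ a) (hj1 : 1 ≤ j) (hjk : j ≤ k)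
    (htt : 0 ≤ target) :
    ∀ (m : Nat) (c : Int), c = a - 1 + (m : Int) → c ≤ target →
    ∀ (s : List (List Int)) (o : Int → Int → Int), Shape k target s →
    (∀ j' x', 0 ≤ j' → j' ≤ k → 0 ≤ x' → x' ≤ target →
      getAt s j' x' = if j' = j ∧ c < x' then o (j-1) (x'-a) + o j x' else o j' x') →
    Shape k target ((PySem.List.pyRange c (a-1) (-1)).foldl (xbody a j) s) ∧
    (∀ j' x', 0 ≤ j' → j' ≤ k → 0 ≤ x' → x' ≤ target →
      getAt ((PySem.List.pyRange c (a-1) (-1)).foldl (xbody a j) s) j' x' =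
        if j' = j ∧ a - 1 < x' then o (j-1) (x'-a) + o j x' else o j' x') := by
  intro m
  induction m with
  | zero =>
    intro c hc hct s o hs hinv
    rw [PySem.List.pyRange_neg_one_eq_nil (by omega)]
    simp only [List.foldl_nil]
    refine ⟨hs, ?_⟩
    intro j' x' h1 h2 h3 h4
    rw [hinv j' x' h1 h2 h3 h4]
    by_cases h5 : j' = j
    · congr 1
      simp only [h5, true_and, eq_iff_iff]
      constructor <;> intro <;> omega
    · rw [if_neg (fun h => h5 h.1), if_neg (fun h => h5 h.1)]
  | succ m ih =>
    intro c hc hct s o hs hinv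
    rw [PySem.List.pyRange_neg_one_cons (by omega)]
    simp only [List.foldl_cons]
    have hc0 : 0 ≤ c := by omega
    obtain ⟨hin, hrl⟩ := row_len hs (by omega : (0:Int) ≤ j) hjk
    have hs' : Shape k target (xbody a j s c) :=
      shape_updAt hs j c _ (by omega) hc0
    have hup : ∀ j' x', 0 ≤ j' → 0 ≤ x' →
        getAt (xbody a j s c) j' x' =
          if j' = j ∧ x' = c then getAt s (j-1) (c-a) + getAt s j c else getAt s j' x' :=
      fun j' x' h1 h3 => getAt_updAt j c _ (by omega) hc0 j' x' h1 h3 hin (by omega)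
    have hread1 : getAt s (j-1) (c-a) = o (j-1) (c-a) := by
      rw [hinv (j-1) (c-a) (by omega) (by omega) (by omega) (by omega)]
      rw [if_neg (by omega)]
    have hread2 : getAt s j c = o j c := by
      rw [hinv j c (by omega) hjk hc0 hct]
      rw [if_neg (by omega)]
    have := ih (c-1) (by omega) (by omega) (xbody a j s c) o hs' ?_
    · simpa using this
    · intro j' x' h1 h2 h3 h4
      rw [hup j' x' h1 h3]
      by_cases hcase : j' = j ∧ x' = c
      · rw [if_pos hcase, hread1, hread2, if_pos ⟨hcase.1, by omega⟩, hcase.2]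
      · rw [if_neg hcase, hinv j' x' h1 h2 h3 h4]
        by_cases h5 : j' = j
        · have h6 : x' ≠ c := fun h => hcase ⟨h5, h⟩
          congr 1
          simp only [h5, true_and, eq_iff_iff]
          constructor <;> intro <;> omega
        · rw [if_neg (fun h => h5 h.1), if_neg (fun h => h5 h.1)]

theorem xloop {k target a j : Int} (ha : 0 ≤ a) (hj1 : 1 ≤ j) (hjk : j ≤ k)
    (htt : 0 ≤ target) (s : List (List Int)) (hs : Shape k target s) :
    Shape k target (rowloop target a j s) ∧
    (∀ j' x', 0 ≤ j' → j' ≤ k → 0 ≤ x' → x' ≤ target →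
      getAt (rowloop target a j s) j' x' =
        if j' = j ∧ a - 1 < x' then getAt s (j-1) (x'-a) + getAt s j x' else getAt s j' x') := by
  unfold rowloop
  by_cases hle : a - 1 ≤ target
  · exact xloop_aux ha hj1 hjk htt (target - (a-1)).toNat target (by omega) le_rfl s (getAt s) hs
      (fun j' x' h1 h2 h3 h4 => by rw [if_neg (by omega)])
  · rw [PySem.List.pyRange_neg_one_eq_nil (by omega)]
    simp only [List.foldl_nil]
    refine ⟨hs, ?_⟩
    intro j' x' h1 h2 h3 h4
    rw [if_neg (by omega)]

-- j-loop
theorem jloop_aux {k target a : Int} (ha : 0 ≤ a) (htt : 0 ≤ target) :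
    ∀ (m : Nat) (c : Int), c = (m : Int) → c ≤ k →
    ∀ (s : List (List Int)) (o : Int → Int → Int), Shape k target s →
    (∀ j' x', 0 ≤ j' → j' ≤ k → 0 ≤ x' → x' ≤ target →
      getAt s j' x' = if c < j' then
          (if 1 ≤ j' ∧ a ≤ x' then o (j'-1) (x'-a) + o j' x' else o j' x') else o j' x') →
    Shape k target ((PySem.List.pyRange c 0 (-1)).foldl (fun s j => rowloop target a j s) s) ∧
    (∀ j' x', 0 ≤ j' → j' ≤ k → 0 ≤ x' → x' ≤ target →
      getAt ((PySem.List.pyRange c 0 (-1)).foldl (fun s j => rowloop target a j s) s) j' x' =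
        if 0 < j' then
          (if 1 ≤ j' ∧ a ≤ x' then o (j'-1) (x'-a) + o j' x' else o j' x') else o j' x') := by
  intro m
  induction m with
  | zero =>
    intro c hc hck s o hs hinv
    rw [PySem.List.pyRange_neg_one_eq_nil (by omega)]
    simp only [List.foldl_nil]
    exact ⟨hs, fun j' x' h1 h2 h3 h4 => by rw [hinv j' x' h1 h2 h3 h4]; subst hc; rfl⟩
  | succ m ih =>
    intro c hc hck s o hs hinv
    rw [PySem.List.pyRange_neg_one_cons (by omega)]
    simp only [List.foldl_cons]
    have hc1 : 1 ≤ c := by omega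
    obtain ⟨hsx, hx⟩ := xloop ha hc1 hck htt s hs
    refine (ih (c-1) (by omega) (by omega) _ o hsx ?_)
    intro j' x' h1 h2 h3 h4
    rw [hx j' x' h1 h2 h3 h4]
    by_cases hcase : j' = c
    · subst hcase
      have hr1 : ∀ hx2 : a ≤ x', getAt s (j'-1) (x'-a) = o (j'-1) (x'-a) := by
        intro hx2
        rw [hinv (j'-1) (x'-a) (by omega) (by omega) (by omega) (by omega), if_neg (by omega)]
      have hr2 : getAt s j' x' = o j' x' := by
        rw [hinv j' x' h1 h2 h3 h4, if_neg (by omega)]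
      by_cases hx2 : a ≤ x'
      · rw [if_pos (show j' = j' ∧ a - 1 < x' from ⟨rfl, by omega⟩),
            if_pos (show j' - 1 < j' by omega),
            if_pos (show 1 ≤ j' ∧ a ≤ x' from ⟨hc1, hx2⟩), hr1 hx2, hr2]
      · rw [if_neg (show ¬(j' = j' ∧ a - 1 < x') from fun h => hx2 (by omega)),
            if_pos (show j' - 1 < j' by omega),
            if_neg (show ¬(1 ≤ j' ∧ a ≤ x') from fun h => hx2 h.2), hr2]
    · rw [if_neg (fun h => hcase h.1), hinv j' x' h1 h2 h3 h4]
      by_cases h5 : c < j'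
      · rw [if_pos h5, if_pos (show c - 1 < j' by omega)]
      · rw [if_neg h5, if_neg (show ¬(c - 1 < j') by omega)]

theorem zok_stepF {k target a : Int} {F : Int → Int → Int} (ha : 0 ≤ a) (hF : Zok F) :
    Zok (stepF k target a F) := by
  intro j t h
  unfold stepF
  rcases h with h | h
  · rw [hF j t (Or.inl h), hF (j-1) (t-a) (Or.inl (by omega))]; simp
  · rw [hF j t (Or.inr h), hF (j-1) (t-a) (Or.inr (by omega))]; simp

theorem zok_F0 : Zok F0 := by
  intro j t h; unfold F0; simp only [ite_eq_right_iff]; rintro ⟨rfl, rfl⟩; omega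

-- one item
theorem item_step {k target a : Int} (ha : 0 ≤ a) (hk : 0 ≤ k) (htt : 0 ≤ target)
    {s : List (List Int)} {F : Int → Int → Int} (hs : Shape k target s)
    (hF : ∀ j' x', 0 ≤ j' → j' ≤ k → 0 ≤ x' → x' ≤ target → getAt s j' x' = F j' x')
    (hz : Zok F) :
    Shape k target (ibody k target a s) ∧
    (∀ j' x', 0 ≤ j' → j' ≤ k → 0 ≤ x' → x' ≤ target →
      getAt (ibody k target a s) j' x' = stepF k target a F j' x') := by
  obtain ⟨h1, h2⟩ := jloop_aux ha htt k.toNat k (by omega) le_rfl s F hs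
    (fun j' x' a1 a2 a3 a4 => by rw [if_neg (by omega)]; exact hF j' x' a1 a2 a3 a4)
  refine ⟨h1, ?_⟩
  intro j' x' a1 a2 a3 a4
  unfold ibody
  rw [h2 j' x' a1 a2 a3 a4]
  unfold stepF
  by_cases hj0 : 0 < j'
  · rw [if_pos hj0, if_pos (show j' ≤ k ∧ x' ≤ target from ⟨a2, a4⟩)]
    by_cases hx2 : a ≤ x'
    · rw [if_pos (show 1 ≤ j' ∧ a ≤ x' from ⟨by omega, hx2⟩)]
      ring
    · rw [if_neg (show ¬(1 ≤ j' ∧ a ≤ x') from fun h => hx2 h.2),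
          hz (j'-1) (x'-a) (Or.inr (by omega))]
      ring
  · rw [if_neg hj0, if_pos (show j' ≤ k ∧ x' ≤ target from ⟨a2, a4⟩),
        hz (j'-1) (x'-a) (Or.inl (by omega))]
    ring

-- whole list
theorem all_items {k target : Int} (hk : 0 ≤ k) (htt : 0 ≤ target) :
    ∀ (L : List Int) (s : List (List Int)) (F : Int → Int → Int),
    (∀ a ∈ L, 0 ≤ a) → Shape k target s →
    (∀ j' x', 0 ≤ j' → j' ≤ k → 0 ≤ x' → x' ≤ target → getAt s j' x' = F j' x') → Zok F →
    Shape k target (L.foldl (fun s a => ibody k target a s) s) ∧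
    (∀ j' x', 0 ≤ j' → j' ≤ k → 0 ≤ x' → x' ≤ target →
      getAt (L.foldl (fun s a => ibody k target a s) s) j' x' =
        (L.foldl (fun F a => stepF k target a F) F) j' x') := by
  intro L
  induction L with
  | nil => intro s F _ hs hF _; exact ⟨hs, fun j' x' a1 a2 a3 a4 => hF j' x' a1 a2 a3 a4⟩
  | cons a as ih =>
    intro s F hL hs hF hz
    obtain ⟨h1, h2⟩ := item_step (hL a (by simp)) hk htt hs hF hz
    simpa using ih _ _ (fun b hb => hL b (by simp [hb])) h1 h2
      (zok_stepF (hL a (by simp)) hz)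

-- initial table
theorem init_table {k target : Int} (hk : 0 ≤ k) (htt : 0 ≤ target) :
    Shape k target (updAt ((PySem.List.pyRange 0 (k+1) 1).map
        (fun _ => List.replicate (target+1).toNat 0)) 0 0 1) ∧
    (∀ j' x', 0 ≤ j' → j' ≤ k → 0 ≤ x' → x' ≤ target →
      getAt (updAt ((PySem.List.pyRange 0 (k+1) 1).map
        (fun _ => List.replicate (target+1).toNat 0)) 0 0 1) j' x' = F0 j' x') := by
  have hs0 : Shape k target ((PySem.List.pyRange 0 (k+1) 1).map
      (fun _ => List.replicate (target+1).toNat 0)) := by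
    constructor
    · simp [PySem.List.length_pyRange_one]
    · intro r hr
      simp only [List.mem_map] at hr
      obtain ⟨_, _, rfl⟩ := hr
      simp
  have hget0 : ∀ j' x', 0 ≤ j' → 0 ≤ x' →
      getAt ((PySem.List.pyRange 0 (k+1) 1).map
        (fun _ => List.replicate (target+1).toNat 0)) j' x' = 0 := by
    intro j' x' h1 h3
    rw [getAt_nonneg _ _ _ h1 h3]
    simp only [List.getD_eq_getElem?_getD, List.getElem?_map]
    cases h : (PySem.List.pyRange 0 (k+1) 1)[j'.toNat]? with
    | none => simp
    | some y =>
      simp [List.getElem?_replicate]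
      split <;> simp
  obtain ⟨hin, hrl⟩ := row_len hs0 (le_refl (0:Int)) hk
  refine ⟨shape_updAt hs0 0 0 1 le_rfl le_rfl, ?_⟩
  intro j' x' h1 h2 h3 h4
  rw [getAt_updAt 0 0 1 le_rfl le_rfl j' x' h1 h3 hin (by omega)]
  unfold F0
  by_cases hc : j' = 0 ∧ x' = 0
  · rw [if_pos hc, if_pos hc]
  · rw [if_neg hc, if_neg hc, hget0 j' x' h1 h3]

-- with k = 0 the j-loop of A is empty
theorem foldl_ibody_zero (target : Int) :
    ∀ (L : List Int) (s : List (List Int)),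
    L.foldl (fun s a => ibody 0 target a s) s = s := by
  intro L
  induction L with
  | nil => intro s; rfl
  | cons a as ih =>
    intro s
    rw [List.foldl_cons]
    have h : ibody 0 target a s = s := by
      unfold ibody
      rw [PySem.List.pyRange_neg_one_eq_nil le_rfl]
      rfl
    rw [h, ih]

-- proof-side name for A's initial table (definitionally the port's)
def S1 (k target : Int) : List (List Int) :=
  updAt ((PySem.List.pyRange 0 (k+1) 1).map (fun _ => List.replicate (target+1).toNat 0)) 0 0 1

-- glue: array table to list table
def gT (s : Array (Array Int)) : List (List Int) := s.toList.map Array.toList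

theorem gT_getD (s : Array (Array Int)) (n : Nat) :
    (gT s).getD n [] = (s.getD n #[]).toList := by
  unfold gT
  rw [List.getD_eq_getElem?_getD, List.getElem?_map, Array.getElem?_toList,
      Array.getD_eq_getD_getElem?]
  cases s[n]? <;> rfl

theorem row_getD (r : Array Int) (n : Nat) : r.toList.getD n 0 = r.getD n 0 := by
  rw [List.getD_eq_getElem?_getD, Array.getElem?_toList, Array.getD_eq_getD_getElem?]

theorem aGet_eq (s : Array (Array Int)) (j x : Int) (hj : 0 ≤ j) (hx : 0 ≤ x) :
    (s.getD j.toNat #[]).getD x.toNat 0 = getAt (gT s) j x := by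
  rw [getAt_nonneg _ _ _ hj hx, gT_getD, row_getD]

theorem gT_modify (s : Array (Array Int)) (j x v : Int) (hj : 0 ≤ j) (hx : 0 ≤ x) :
    gT (s.modify j.toNat (fun row => row.setIfInBounds x.toNat v)) = updAt (gT s) j x v := by
  rw [updAt_nonneg _ _ _ _ hj hx]
  unfold gT
  rw [Array.toList_modify]
  apply List.ext_getElem?
  intro i
  rw [List.getElem?_map, List.getElem?_modify, List.getElem?_set]
  by_cases hij : j.toNat = i
  · subst hij
    cases h : s.toList[j.toNat]? with
    | none =>
      have hlen : s.size ≤ j.toNat := by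
        simpa using List.getElem?_eq_none_iff.mp h
      simp [hlen]
    | some r =>
      obtain ⟨hl, he⟩ := List.getElem?_eq_some_iff.mp h
      have hlen : j.toNat < (s.toList.map Array.toList).length := by simpa using hl
      have hgetd : (s.toList.map Array.toList).getD j.toNat [] = r.toList := by
        rw [List.getD_eq_getElem?_getD, List.getElem?_map, h]; rfl
      have harr : s[j.toNat]? = some r := by rw [← Array.getElem?_toList]; exact h
      have hsz : j.toNat < s.size := by simpa using hl
      have hgr : s[j.toNat] = r := by
        have := Array.getElem?_eq_getElem hsz
        rw [harr] at this
        exact (Option.some_inj.mp this).symm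
      simp [hsz, hgr, Array.toList_setIfInBounds]
  · simp [hij, List.getElem?_map]

-- array-side loop bodies (definitionally the port's lambdas)
def axbody (a j : Int) (s : Array (Array Int)) (x : Int) : Array (Array Int) :=
  let v := (s.getD (j-1).toNat #[]).getD (x - a).toNat 0 + (s.getD j.toNat #[]).getD x.toNat 0
  s.modify j.toNat (fun row => row.setIfInBounds x.toNat v)
def arowloop (target a j : Int) (s : Array (Array Int)) : Array (Array Int) :=
  (PySem.List.pyRange target (a-1) (-1)).foldl (axbody a j) s
def aibody (k target a : Int) (s : Array (Array Int)) : Array (Array Int) :=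
  (PySem.List.pyRange k 0 (-1)).foldl (fun s j => arowloop target a j s) s
def aS1 (k target : Int) : Array (Array Int) :=
  (((PySem.List.pyRange 0 (k+1) 1).map
      (fun _ => Array.replicate (target+1).toNat (0:Int))).toArray).modify
    (0:Int).toNat (fun row => row.setIfInBounds (0:Int).toNat 1)

theorem foldl_comm_g {α β γ : Type} (g : α → β) :
    ∀ (l : List γ) (fA : α → γ → α) (fL : β → γ → β) (s : α),
    (∀ (s' : α) (x : γ), x ∈ l → g (fA s' x) = fL (g s') x) →
    g (l.foldl fA s) = l.foldl fL (g s) := by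
  intro l
  induction l with
  | nil => intro fA fL s _; rfl
  | cons x xs ih =>
    intro fA fL s h
    simp only [List.foldl_cons]
    rw [← h s x (by simp)]
    exact ih fA fL (fA s x) (fun s' y hy => h s' y (by simp [hy]))

theorem xstep_comm (a j : Int) (ha : 0 ≤ a) (hj : 1 ≤ j) (s : Array (Array Int)) (x : Int)
    (hx : a ≤ x) : gT (axbody a j s x) = xbody a j (gT s) x := by
  unfold axbody xbody
  rw [gT_modify s j x _ (by omega) (by omega), aGet_eq s (j-1) (x-a) (by omega) (by omega),
      aGet_eq s j x (by omega) (by omega)]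

theorem rowloop_comm (target a j : Int) (ha : 0 ≤ a) (hj : 1 ≤ j) (s : Array (Array Int)) :
    gT (arowloop target a j s) = rowloop target a j (gT s) := by
  unfold arowloop rowloop
  exact foldl_comm_g gT _ _ _ s (fun s' x hx =>
    xstep_comm a j ha hj s' x (by
      have := (PySem.List.mem_pyRange_neg_one).mp hx
      omega))

theorem ibody_comm (k target a : Int) (ha : 0 ≤ a ∨ k ≤ 0) (s : Array (Array Int)) :
    gT (aibody k target a s) = ibody k target a (gT s) := by
  unfold aibody ibody
  by_cases hk : k ≤ 0
  · rw [PySem.List.pyRange_neg_one_eq_nil (by omega)]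
    rfl
  · have ha' : 0 ≤ a := by rcases ha with h | h; exact h; exact absurd h hk
    exact foldl_comm_g gT _ _ _ s (fun s' j hj =>
      rowloop_comm target a j ha' (by
        have := (PySem.List.mem_pyRange_neg_one).mp hj
        omega) s')

theorem gT_aS1 (k target : Int) : gT (aS1 k target) = S1 k target := by
  unfold aS1 S1
  rw [gT_modify _ 0 0 1 le_rfl le_rfl]
  congr 1
  unfold gT
  rw [List.toList_toArray, List.map_map]
  have hfc : (Array.toList ∘ fun _ : Int => Array.replicate (target+1).toNat (0:Int)) =
      (fun _ : Int => List.replicate (target+1).toNat (0:Int)) := by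
    funext _; simp
  rw [hfc]

theorem kSum_eq_list (A : List Int) (k target : Int) (hk : 0 ≤ k) (ht : 0 ≤ target)
    (hor : k = 0 ∨ ∀ a ∈ A, 0 ≤ a) :
    kSum A k target = getAt (A.foldl (fun s a => ibody k target a s) (S1 k target)) k target := by
  have h := PySem.List.foldl_pyRange_zero_pyGetD' A 0 (fun s a => aibody k target a s) (aS1 k target)
  have h1 : kSum A k target =
      ((A.foldl (fun s a => aibody k target a s) (aS1 k target)).getD k.toNat #[]).getD
        target.toNat 0 := by
    calc kSum A k target
        = (((PySem.List.pyRange 0 (A.length : Int) 1).foldl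
            (fun acc j => aibody k target (PySem.List.pyGetD A j 0) acc)
            (aS1 k target)).getD k.toNat #[]).getD target.toNat 0 := rfl
      _ = _ := congrArg (fun z => (z.getD k.toNat #[]).getD target.toNat 0) h
  have hcm := foldl_comm_g gT A (fun s a => aibody k target a s)
      (fun s a => ibody k target a s) (aS1 k target) (fun s' a haA =>
        ibody_comm k target a (by
          rcases hor with h0 | h0
          · exact Or.inr (by omega)
          · exact Or.inl (h0 a haA)) s')
  rw [h1, aGet_eq _ k target hk ht, hcm, gT_aS1]

-- ===== B-side: the recursion equals a fold of its own one-item step =====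
def stepG (a : Int) (F : Int → Int → Int) : Int → Int → Int :=
  fun j t => if 1 ≤ j ∧ 0 ≤ t - a then F j t + F (j-1) (t-a) else F j t

theorem kSumRec_eq_fold (A : List Int) :
    ∀ (i : Nat), i ≤ A.length → ∀ j t,
    kSumRec A i j t = ((A.take i).foldl (fun F a => stepG a F) F0) j t := by
  intro i
  induction i with
  | zero => intro _ j t; rfl
  | succ i' ih =>
    intro hle j t
    have hlt : i' < A.length := by omega
    have htake : A.take (i' + 1) = A.take i' ++ [A[i']] := by
      rw [List.take_add_one, List.getElem?_eq_getElem hlt]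
      rfl
    have hget : PySem.List.pyGetD A (i' : Int) 0 = A[i'] := by
      have := PySem.List.pyGetD_natCast A i' (0 : Int)
      rw [this, List.getD_eq_getElem _ _ hlt]
    show (let a := PySem.List.pyGetD A (i' : Int) 0
          let r := kSumRec A i' j t
          if 1 ≤ j ∧ 0 ≤ t - a then r + kSumRec A i' (j-1) (t-a) else r) = _
    simp only [hget, htake, List.foldl_append, List.foldl_cons, List.foldl_nil]
    rw [ih (by omega) j t, ih (by omega) (j-1) (t - A[i'])]
    unfold stepG
    split_ifs <;> rfl

theorem kSum_alt_eq_foldG (A : List Int) (k target : Int) :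
    kSum_alt A k target = (A.foldl (fun F a => stepG a F) F0) k target := by
  have h := kSumRec_eq_fold A A.length le_rfl k target
  rw [List.take_length] at h
  exact h

-- the two abstract one-item steps produce the same table on [0,k]×[0,target]
theorem folds_agree {k target : Int} (_hk : 0 ≤ k) (_ht : 0 ≤ target) :
    ∀ (L : List Int), (∀ a ∈ L, 0 ≤ a) → ∀ (F G : Int → Int → Int), Zok F →
    (∀ j t, 0 ≤ j → j ≤ k → 0 ≤ t → t ≤ target → F j t = G j t) →
    ∀ j t, 0 ≤ j → j ≤ k → 0 ≤ t → t ≤ target →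
      (L.foldl (fun F a => stepF k target a F) F) j t =
        (L.foldl (fun G a => stepG a G) G) j t := by
  intro L
  induction L with
  | nil => intro _ F G _ hFG j t h1 h2 h3 h4; exact hFG j t h1 h2 h3 h4
  | cons a as ih =>
    intro hL F G hz hFG
    have ha : 0 ≤ a := hL a (by simp)
    simp only [List.foldl_cons]
    refine ih (fun b hb => hL b (by simp [hb])) _ _ (zok_stepF ha hz) ?_
    intro j t h1 h2 h3 h4
    unfold stepF stepG
    rw [if_pos (show j ≤ k ∧ t ≤ target from ⟨h2, h4⟩)]
    by_cases hc : 1 ≤ j ∧ 0 ≤ t - a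
    · rw [if_pos hc, hFG j t h1 h2 h3 h4,
          hFG (j-1) (t-a) (by omega) (by omega) (by omega) (by omega)]
    · rw [if_neg hc, hz (j-1) (t-a) (by omega), hFG j t h1 h2 h3 h4]
      ring

-- row 0 of the B-side fold never changes
theorem row0_foldG :
    ∀ (L : List Int) (G : Int → Int → Int) (t : Int),
    (L.foldl (fun G a => stepG a G) G) 0 t = G 0 t := by
  intro L
  induction L with
  | nil => intro G t; rfl
  | cons a as ih =>
    intro G t
    rw [List.foldl_cons, ih]
    unfold stepG
    rw [if_neg (by omega)]

-- ===== VERDICT (by name: the statement is the Claim_ definition above) =====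
theorem kSum_spec : Claim_equal_kSum := by
  unfold Claim_equal_kSum
  intro A k target _ hpre
  obtain ⟨hk, ht, hkor⟩ := hpre
  unfold Spec_kSum
  rw [kSum_alt_eq_foldG A k target, kSum_eq_list A k target hk ht hkor]
  by_cases hall : ∀ a ∈ A, 0 ≤ a
  · obtain ⟨hs1, hF1⟩ := init_table hk ht
    obtain ⟨_, h2⟩ := all_items hk ht A (S1 k target) F0 hall hs1 hF1 zok_F0
    rw [h2 k target hk le_rfl ht le_rfl]
    exact folds_agree hk ht A hall F0 F0 zok_F0 (fun _ _ _ _ _ _ => rfl)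
      k target hk le_rfl ht le_rfl
  · have hk0 : k = 0 := by rcases hkor with h | h; exact h; exact absurd h hall
    subst hk0
    rw [foldl_ibody_zero target A (S1 0 target)]
    unfold S1
    obtain ⟨_, hF1⟩ := init_table le_rfl ht
    rw [hF1 0 target le_rfl le_rfl ht le_rfl, row0_foldG A F0 target]
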